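-- pv_equiv track=rewrite | github.com/augustompm/CUDA-clustalW | GPU/cuda_clustalw_final/master-read.py | parse_make_output
-- ===== SOURCE A (Python) =====
-- def parse_make_output(make_out, make_err):
--     """
--     Faz parse básico de warnings e errors em make_out/make_err.
--     Retorna (all_warnings, all_errors) como listas de strings e
--     (parsed_lines) com todo o output raw.
--     """
--     # Um parse simples: procurar linhas que contenham "error:" ou "warning:".
--     # Exemplo: "cudaFullPairwiseAlign.cu(83): error: no instance..."
--     # ou clang/gcc style: "file.cpp:123: error: something"
--     warnings = []
--     errors = []
--     parsed_lines = []
--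
--     def classify_line(line):
--         lower = line.lower()
--         if "error:" in lower:
--             errors.append(line)
--         elif "warning:" in lower:
--             warnings.append(line)
--
--     # Processar stdout
--     for line in make_out.splitlines():
--         parsed_lines.append(line)
--         classify_line(line)
--
--     # Processar stderr
--     for line in make_err.splitlines():
--         parsed_lines.append(line)
--         classify_line(line)
--
--     return warnings, errors, parsed_lines
-- ===== SOURCE B (Python) =====
-- def _partition(lines, token):
--     """Split lines into (lines containing token case-insensitively, the rest), order kept."""
--     hits, misses = [], []
--     for line in lines:
--         (hits if token in line.lower() else misses).append(line)
--     return hits, misses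
--
--
-- def parse_make_output(make_out, make_err):
--     """Staged partition pipeline: collect lines, peel off errors, then warnings from the rest."""
--     parsed_lines = make_out.splitlines() + make_err.splitlines()
--     errors, rest = _partition(parsed_lines, "error:")
--     warnings, _ = _partition(rest, "warning:")
--     return warnings, errors, parsed_lines
-- ===== Notes on version B (the rewrite author's own statement) =====
-- stated objective: alternative
-- what changed: Replaces A's fused collect-and-classify loop (three accumulators mutated per line, error-over-warning encoded by an elif) with a staged pipeline: collect all lines, then apply a generic partition helper twice — first peeling off error lines, then partitioning the remainder for warnings — so the priority follows from staging, not from a conditional.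
import Mathlib
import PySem

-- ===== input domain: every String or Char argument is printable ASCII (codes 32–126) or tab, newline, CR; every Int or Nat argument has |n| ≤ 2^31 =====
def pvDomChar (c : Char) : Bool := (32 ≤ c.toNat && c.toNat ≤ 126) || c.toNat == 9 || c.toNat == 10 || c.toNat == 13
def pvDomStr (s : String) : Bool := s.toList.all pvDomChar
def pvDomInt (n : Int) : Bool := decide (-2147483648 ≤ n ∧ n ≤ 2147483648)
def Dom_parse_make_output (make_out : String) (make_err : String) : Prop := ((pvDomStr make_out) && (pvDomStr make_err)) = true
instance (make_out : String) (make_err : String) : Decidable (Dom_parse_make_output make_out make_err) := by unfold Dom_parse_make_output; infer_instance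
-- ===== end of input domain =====

-- B replaces A's fused collect-and-classify loop by a staged pipeline: collect lines, partition off errors, then partition the remainder for warnings (objective: alternative).
-- ===== PORT A =====
-- A's helper classify_line mutates warnings/errors; ported as a state-passing step over (warnings, errors).
def pvClassifyLine (line : String) (st : List String × List String) : List String × List String :=
  let lower := PySem.Str.lower line
  if PySem.Str.isIn "error:" lower then (st.1, st.2 ++ [line])
  else if PySem.Str.isIn "warning:" lower then (st.1 ++ [line], st.2)
  else st

def parse_make_output (make_out : String) (make_err : String) : List String × List String × List String :=
  let st0 : (List String × List String) × List String := (([], []), [])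
  let st1 := (PySem.Str.splitlines make_out).foldl
    (fun st line => (pvClassifyLine line st.1, st.2 ++ [line])) st0
  let st2 := (PySem.Str.splitlines make_err).foldl
    (fun st line => (pvClassifyLine line st.1, st.2 ++ [line])) st1
  (st2.1.1, st2.1.2, st2.2)

-- ===== PORT B =====
def pvPartition (lines : List String) (token : String) : List String × List String :=
  lines.foldl (fun st line =>
    if PySem.Str.isIn token (PySem.Str.lower line) then (st.1 ++ [line], st.2)
    else (st.1, st.2 ++ [line])) ([], [])

def parse_make_output_alt (make_out : String) (make_err : String) : List String × List String × List String :=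
  let parsed_lines := PySem.Str.splitlines make_out ++ PySem.Str.splitlines make_err
  let pe := pvPartition parsed_lines "error:"
  let pw := pvPartition pe.2 "warning:"
  (pw.1, pe.1, parsed_lines)

-- ===== PRECONDITION & SPEC =====
def Spec_parse_make_output (make_out : String) (make_err : String) (out : List String × List String × List String) : Prop := out = parse_make_output_alt make_out make_err
instance (make_out : String) (make_err : String) (out : List String × List String × List String) : Decidable (Spec_parse_make_output make_out make_err out) := by unfold Spec_parse_make_output; infer_instance

-- ===== CLAIM (what is proved, stated in full; the proofs are below) =====
def Claim_equal_parse_make_output : Prop := ∀ (make_out : String) (make_err : String), Dom_parse_make_output make_out make_err → Spec_parse_make_output make_out make_err (parse_make_output make_out make_err)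

-- ===== LEMMAS AND PROOFS =====
lemma pvFold_char (lines : List String) (w e p : List String) :
    lines.foldl (fun st line => (pvClassifyLine line st.1, st.2 ++ [line])) ((w, e), p)
    = ((w ++ lines.filter (fun l => !(PySem.Str.isIn "error:" (PySem.Str.lower l)) && PySem.Str.isIn "warning:" (PySem.Str.lower l)),
        e ++ lines.filter (fun l => PySem.Str.isIn "error:" (PySem.Str.lower l))),
       p ++ lines) := by
  induction lines generalizing w e p with
  | nil => simp
  | cons l rest ih =>
    simp only [List.foldl_cons]
    by_cases he : PySem.Chars.isIn ['e','r','r','o','r',':'] (PySem.Chars.lower l.toList) = true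
    · have hc : pvClassifyLine l (w, e) = (w, e ++ [l]) := by simp [pvClassifyLine, he]
      rw [hc, ih]
      simp [he]
    · by_cases hw : PySem.Chars.isIn ['w','a','r','n','i','n','g',':'] (PySem.Chars.lower l.toList) = true
      · have hc : pvClassifyLine l (w, e) = (w ++ [l], e) := by simp [pvClassifyLine, he, hw]
        rw [hc, ih]
        simp [he, hw]
      · have hc : pvClassifyLine l (w, e) = (w, e) := by simp [pvClassifyLine, he, hw]
        rw [hc, ih]
        simp [he, hw]

lemma pvPartition_filter (lines : List String) (token : String) :
    pvPartition lines token
    = (lines.filter (fun l => PySem.Str.isIn token (PySem.Str.lower l)),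
       lines.filter (fun l => !(PySem.Str.isIn token (PySem.Str.lower l)))) := by
  have key : ∀ (ls : List String) (h m : List String),
      ls.foldl (fun st line =>
        if PySem.Str.isIn token (PySem.Str.lower line) then (st.1 ++ [line], st.2)
        else (st.1, st.2 ++ [line])) (h, m)
      = (h ++ ls.filter (fun l => PySem.Str.isIn token (PySem.Str.lower l)),
         m ++ ls.filter (fun l => !(PySem.Str.isIn token (PySem.Str.lower l)))) := by
    intro ls
    induction ls with
    | nil => simp
    | cons l rest ih =>
      intro h m
      simp only [List.foldl_cons]
      by_cases ht : PySem.Chars.isIn token.toList (PySem.Chars.lower l.toList) = true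
      · rw [if_pos (by simpa [PySem.Str.isIn, PySem.Str.lower] using ht), ih]
        simp [PySem.Str.isIn, PySem.Str.lower, ht]
      · rw [if_neg (by simpa [PySem.Str.isIn, PySem.Str.lower] using ht), ih]
        simp [PySem.Str.isIn, PySem.Str.lower, ht]
  simpa [pvPartition] using key lines [] []

-- ===== VERDICT (by name: the statement is the Claim_ definition above) =====
theorem parse_make_output_spec : Claim_equal_parse_make_output := by
  intro mo me _
  show _ = _
  have hf : ∀ ls : List String,
      (ls.filter (fun l => !(PySem.Str.isIn "error:" (PySem.Str.lower l)))).filter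
          (fun l => PySem.Str.isIn "warning:" (PySem.Str.lower l))
      = ls.filter (fun l => !(PySem.Str.isIn "error:" (PySem.Str.lower l)) && PySem.Str.isIn "warning:" (PySem.Str.lower l)) := by
    intro ls
    rw [List.filter_filter]
    exact List.filter_congr (fun x _ => by rw [Bool.and_comm])
  simp only [parse_make_output, parse_make_output_alt, pvFold_char, pvPartition_filter,
    List.filter_append, List.nil_append, hf]
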